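-- pv_equiv track=rewrite | github.com/lordjuacs/ICC-Trabajos | Ciclo 1/Examen2/2conteo_caracteres.py | contar_caracteres2
-- ===== SOURCE A (Python) =====
-- def contar_caracteres2(string):
--     dic = {"Espacios": 0, "Letras": 0, "Numeros": 0}
--     for i in string:
--         if i == " ":
--             dic["Espacios"] += 1
--         elif i.isalpha():
--             dic["Letras"] += 1
--         elif i.isdigit():
--             dic["Numeros"] += 1
--     return dic
-- ===== SOURCE B (Python) =====
-- # B: same three counts, each computed by its own comprehension pass (no mutable dict accumulation).
-- def contar_caracteres2(string):
--     return {
--         "Espacios": sum(1 for c in string if c == " "),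
--         "Letras": sum(1 for c in string if c != " " and c.isalpha()),
--         "Numeros": sum(1 for c in string if c != " " and not c.isalpha() and c.isdigit()),
--     }
-- ===== Notes on version B (the rewrite author's own statement) =====
-- stated objective: alternative
-- what changed: Replaces the single mutable-dict accumulation loop by three independent counting passes (one sum-comprehension per key), keeping the elif precedence inside each guard.
import Mathlib
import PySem

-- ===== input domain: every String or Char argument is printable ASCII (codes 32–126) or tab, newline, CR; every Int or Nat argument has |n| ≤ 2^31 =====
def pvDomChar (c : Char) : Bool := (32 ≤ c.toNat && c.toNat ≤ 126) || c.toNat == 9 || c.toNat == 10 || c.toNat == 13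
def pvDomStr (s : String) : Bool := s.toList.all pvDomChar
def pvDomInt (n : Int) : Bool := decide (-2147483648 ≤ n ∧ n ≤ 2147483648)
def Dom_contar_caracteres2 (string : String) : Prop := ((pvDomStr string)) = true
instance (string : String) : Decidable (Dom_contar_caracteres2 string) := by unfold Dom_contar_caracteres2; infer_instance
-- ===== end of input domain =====

-- B computes the same three counts with one counting pass per key instead of A's single mutable-dict loop.


-- ===== PORT A =====
def contar_caracteres2 (string : String) : List (String × Int) :=
  (string.toList.foldl
    (fun dic i =>
      if i = ' ' then dic.insert "Espacios" (dic.getD "Espacios" 0 + 1)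
      else if PySem.Chars.isalpha i then dic.insert "Letras" (dic.getD "Letras" 0 + 1)
      else if PySem.Chars.isdigit i then dic.insert "Numeros" (dic.getD "Numeros" 0 + 1)
      else dic)
    (PySem.Dict.ofList [("Espacios", 0), ("Letras", 0), ("Numeros", 0)])).items

-- ===== PORT B =====
def contar_caracteres2_alt (string : String) : List (String × Int) :=
  [("Espacios", (string.toList.countP (fun c => c == ' ') : Int)),
   ("Letras",   (string.toList.countP (fun c => c != ' ' && PySem.Chars.isalpha c) : Int)),
   ("Numeros",  (string.toList.countP (fun c => c != ' ' && !PySem.Chars.isalpha c && PySem.Chars.isdigit c) : Int))]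

-- ===== PRECONDITION & SPEC =====
def Spec_contar_caracteres2 (string : String) (out : List (String × Int)) : Prop := out = contar_caracteres2_alt string
instance (string : String) (out : List (String × Int)) : Decidable (Spec_contar_caracteres2 string out) := by unfold Spec_contar_caracteres2; infer_instance

-- ===== CLAIM (what is proved, stated in full; the proofs are below) =====
def Claim_equal_contar_caracteres2 : Prop := ∀ (string : String), Dom_contar_caracteres2 string → Spec_contar_caracteres2 string (contar_caracteres2 string)

-- ===== LEMMAS AND PROOFS =====

-- A's loop step on the three-key literal dict, computed out.
theorem contar_step_eq (c : Char) (e l n : Int) :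
    (if c = ' ' then (PySem.Dict.mk [("Espacios", e), ("Letras", l), ("Numeros", n)]).insert "Espacios" ((PySem.Dict.mk [("Espacios", e), ("Letras", l), ("Numeros", n)]).getD "Espacios" 0 + 1)
     else if PySem.Chars.isalpha c then (PySem.Dict.mk [("Espacios", e), ("Letras", l), ("Numeros", n)]).insert "Letras" ((PySem.Dict.mk [("Espacios", e), ("Letras", l), ("Numeros", n)]).getD "Letras" 0 + 1)
     else if PySem.Chars.isdigit c then (PySem.Dict.mk [("Espacios", e), ("Letras", l), ("Numeros", n)]).insert "Numeros" ((PySem.Dict.mk [("Espacios", e), ("Letras", l), ("Numeros", n)]).getD "Numeros" 0 + 1)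
     else (PySem.Dict.mk [("Espacios", e), ("Letras", l), ("Numeros", n)]))
    = (if c = ' ' then PySem.Dict.mk [("Espacios", e + 1), ("Letras", l), ("Numeros", n)]
       else if PySem.Chars.isalpha c then PySem.Dict.mk [("Espacios", e), ("Letras", l + 1), ("Numeros", n)]
       else if PySem.Chars.isdigit c then PySem.Dict.mk [("Espacios", e), ("Letras", l), ("Numeros", n + 1)]
       else PySem.Dict.mk [("Espacios", e), ("Letras", l), ("Numeros", n)]) := by
  split_ifs <;> rfl

-- Loop invariant: starting A's fold from the three-key dict with values e, l, n,
-- the items of the result are those starting values plus B's three counts.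
theorem contar_loop_inv (cs : List Char) (e l n : Int) :
    (cs.foldl
      (fun dic i =>
        if i = ' ' then dic.insert "Espacios" (dic.getD "Espacios" 0 + 1)
        else if PySem.Chars.isalpha i then dic.insert "Letras" (dic.getD "Letras" 0 + 1)
        else if PySem.Chars.isdigit i then dic.insert "Numeros" (dic.getD "Numeros" 0 + 1)
        else dic)
      (PySem.Dict.mk [("Espacios", e), ("Letras", l), ("Numeros", n)])).items
    = [("Espacios", e + (cs.countP (fun c => c == ' ') : Int)),
       ("Letras",   l + (cs.countP (fun c => c != ' ' && PySem.Chars.isalpha c) : Int)),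
       ("Numeros",  n + (cs.countP (fun c => c != ' ' && !PySem.Chars.isalpha c && PySem.Chars.isdigit c) : Int))] := by
  induction cs generalizing e l n with
  | nil => simp
  | cons c cs ih =>
    rw [List.foldl_cons, contar_step_eq]
    by_cases hsp : c = ' '
    · rw [if_pos hsp, ih]
      simp [List.countP_cons, hsp, add_comm, add_assoc, add_left_comm]
    · by_cases hal : PySem.Chars.isalpha c = true
      · rw [if_neg hsp, if_pos hal, ih]
        simp [List.countP_cons, hsp, hal, add_comm, add_assoc, add_left_comm]
      · by_cases hdg : PySem.Chars.isdigit c = true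
        · rw [if_neg hsp, if_neg hal, if_pos hdg, ih]
          simp [List.countP_cons, hsp, hal, hdg, add_comm, add_assoc, add_left_comm]
        · rw [if_neg hsp, if_neg hal, if_neg hdg, ih]
          simp [List.countP_cons, hsp, hal, hdg]

-- ===== VERDICT (by name: the statement is the Claim_ definition above) =====
theorem contar_caracteres2_spec : Claim_equal_contar_caracteres2 := by
  intro s _
  show contar_caracteres2 s = contar_caracteres2_alt s
  unfold contar_caracteres2 contar_caracteres2_alt
  rw [show PySem.Dict.ofList [("Espacios", (0:Int)), ("Letras", 0), ("Numeros", 0)]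
      = PySem.Dict.mk [("Espacios", 0), ("Letras", 0), ("Numeros", 0)] from rfl]
  rw [contar_loop_inv]
  simp
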